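-- pv_equiv track=rewrite | github.com/UCSC-nanopore-cgl/signalAlign | src/signalalign/utils/commonFunctions.py | group_sites_in_window2
-- ===== SOURCE A (Python) =====
-- def group_sites_in_window2(sites, window=6):
--     def collect_group(start):
--         i = start
--         g = [sites[start]]
--         while sites[i + 1] - sites[i] < window:
--             g.append(sites[i + 1])
--             i += 1
--             if len(sites) <= i + 1:
--                 break
--         return g, i + 1
--
--     sites.sort()
--     groups = []
--     i = 0
--     while i + 1 < len(sites):
--         g, i = collect_group(i)
--         groups.append(g)
--     return groups
-- ===== SOURCE B (Python) =====
-- def group_sites_in_window2(sites, window=6):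
--     sites.sort()
--     groups, current = [], []
--     for a, b in zip(sites, sites[1:]):
--         if not current:
--             current = [a]
--         if b - a < window:
--             current.append(b)
--         else:
--             groups.append(current)
--             current = []
--     if current:
--         groups.append(current)
--     return groups
-- ===== Notes on version B (the rewrite author's own statement) =====
-- stated objective: simpler
-- what changed: Replaced A's nested collect_group helper and two interacting index-based while loops with a single pass over adjacent pairs zip(sites, sites[1:]) carrying a (groups, current) accumulator.
import Mathlib
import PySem

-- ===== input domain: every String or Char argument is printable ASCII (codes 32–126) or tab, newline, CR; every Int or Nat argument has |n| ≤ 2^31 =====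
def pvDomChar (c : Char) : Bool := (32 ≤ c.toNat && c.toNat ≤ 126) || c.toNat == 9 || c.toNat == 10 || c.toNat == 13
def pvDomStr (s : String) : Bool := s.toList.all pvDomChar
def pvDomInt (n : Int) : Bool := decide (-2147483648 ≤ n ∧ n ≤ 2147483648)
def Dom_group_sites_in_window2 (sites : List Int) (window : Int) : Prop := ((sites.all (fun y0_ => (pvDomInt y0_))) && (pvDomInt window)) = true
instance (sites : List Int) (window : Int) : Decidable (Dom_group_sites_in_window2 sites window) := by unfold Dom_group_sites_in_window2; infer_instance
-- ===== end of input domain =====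

-- B replaces A's nested helper/while-loops by one pass over adjacent pairs with a (groups, current) accumulator; objective: simpler.
-- Both A and B sort `sites` in place in Python; the equivalence proved here is about the return value.

-- ===== PORT A =====
-- inner `while` of collect_group: at state (i, g), if sites[i+1]-sites[i] < window
-- append sites[i+1] and advance; the Python `break` when len(sites) <= i+1 is the
-- same as this guard failing on the next check. Returns (g, i+1) as in Python.
-- `fuel` (always called with s.length, enough for every iteration) only makes the
-- recursion structural; it never changes the computed value.
def pvCollectA (s : List Int) (window : Int) : Nat → Nat → List Int → List Int × Nat
  | fuel + 1, i, g =>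
      if h : i + 1 < s.length then
        if s[i + 1] - s[i]'(by omega) < window then
          pvCollectA s window fuel (i + 1) (g ++ [s[i + 1]])
        else (g, i + 1)
      else (g, i + 1)
  | 0, i, g => (g, i + 1)

-- outer `while i + 1 < len(sites)` of A (same fuel device)
def pvOuterA (s : List Int) (window : Int) : Nat → Nat → List (List Int) → List (List Int)
  | fuel + 1, i, groups =>
      if h : i + 1 < s.length then
        let r := pvCollectA s window s.length i [s[i]'(by omega)]
        pvOuterA s window fuel r.2 (groups ++ [r.1])
      else groups
  | 0, _, groups => groups

def group_sites_in_window2 (sites : List Int) (window : Int) : List (List Int) :=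
  let s := PySem.List.sorted sites (fun x => x) false
  pvOuterA s window s.length 0 []

-- ===== PORT B =====
-- one step of B's `for a, b in zip(sites, sites[1:])` loop
def pvStepB (window : Int) (st : List (List Int) × List Int) (p : Int × Int) :
    List (List Int) × List Int :=
  let current := if st.2.isEmpty then [p.1] else st.2
  if p.2 - p.1 < window then (st.1, current ++ [p.2])
  else (st.1 ++ [current], [])

def group_sites_in_window2_alt (sites : List Int) (window : Int) : List (List Int) :=
  let s := PySem.List.sorted sites (fun x => x) false
  let st := (s.zip (s.drop 1)).foldl (pvStepB window) ([], [])
  if st.2.isEmpty then st.1 else st.1 ++ [st.2]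

-- ===== PRECONDITION & SPEC =====
def Spec_group_sites_in_window2 (sites : List Int) (window : Int) (out : List (List Int)) : Prop := out = group_sites_in_window2_alt sites window
instance (sites : List Int) (window : Int) (out : List (List Int)) : Decidable (Spec_group_sites_in_window2 sites window out) := by unfold Spec_group_sites_in_window2; infer_instance

-- ===== CLAIM (what is proved, stated in full; the proofs are below) =====
def Claim_equal_group_sites_in_window2 : Prop := ∀ (sites : List Int) (window : Int), Dom_group_sites_in_window2 sites window → Spec_group_sites_in_window2 sites window (group_sites_in_window2 sites window)

-- ===== LEMMAS AND PROOFS =====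

-- reference recursion: B's fold written structurally over the pair list
def pvRefB (window : Int) (ps : List (Int × Int)) (cur : List Int) (gs : List (List Int)) :
    List (List Int) :=
  match ps with
  | [] => if cur.isEmpty then gs else gs ++ [cur]
  | p :: rest =>
      let c := if cur.isEmpty then [p.1] else cur
      if p.2 - p.1 < window then pvRefB window rest (c ++ [p.2]) gs
      else pvRefB window rest [] (gs ++ [c])

theorem pvRefB_eq_fold (window : Int) (ps : List (Int × Int)) (cur : List Int)
    (gs : List (List Int)) :
    pvRefB window ps cur gs =
      (let st := ps.foldl (pvStepB window) (gs, cur)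
       if st.2.isEmpty then st.1 else st.1 ++ [st.2]) := by
  induction ps generalizing cur gs with
  | nil => simp [pvRefB]
  | cons p rest ih =>
      simp only [pvRefB, List.foldl_cons]
      by_cases hw : p.2 - p.1 < window <;> simp [pvStepB, hw, ih]

theorem pvDrop_zip {α β : Type} (l1 : List α) (l2 : List β) (i : Nat) :
    (l1.zip l2).drop i = (l1.drop i).zip (l2.drop i) := by
  induction i generalizing l1 l2 with
  | zero => simp
  | succ n ih =>
      cases l1 with
      | nil => simp
      | cons a t1 =>
        cases l2 with
        | nil => simp
        | cons b t2 => simp [ih]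

theorem pvZip_drop (s : List Int) (i : Nat) :
    (s.zip (s.drop 1)).drop i = (s.drop i).zip (s.drop (i + 1)) := by
  rw [pvDrop_zip, List.drop_drop, Nat.add_comm]

theorem pvZip_drop_cons (s : List Int) (i : Nat) (h : i + 1 < s.length) :
    (s.zip (s.drop 1)).drop i
      = (s[i], s[i + 1]) :: (s.zip (s.drop 1)).drop (i + 1) := by
  have h1 : s.drop i = s[i] :: s.drop (i + 1) := List.drop_eq_getElem_cons (by omega)
  have h2 : s.drop (i + 1) = s[i + 1] :: s.drop (i + 1 + 1) := List.drop_eq_getElem_cons (by omega)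
  rw [pvZip_drop, pvZip_drop, h1, h2, List.zip_cons_cons]

theorem pvZip_drop_nil (s : List Int) (i : Nat) (h : ¬ i + 1 < s.length) :
    (s.zip (s.drop 1)).drop i = [] := by
  rw [pvZip_drop]
  have : s.drop (i + 1) = [] := List.drop_eq_nil_of_le (by omega)
  simp [this]

theorem pvRefB_start (window a b : Int) (rest : List (Int × Int)) (gs : List (List Int)) :
    pvRefB window ((a, b) :: rest) [a] gs = pvRefB window ((a, b) :: rest) [] gs := by
  simp [pvRefB]

-- inner loop of A vs reference: from state (i, g) with g nonempty; fuel bounds are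
-- the only hypotheses (always satisfied by the ports' fuel = s.length)
theorem pvInnerOuter_eq_ref (s : List Int) (window : Int) :
    ∀ k i, s.length - i = k →
      (∀ g groups fi fo, g ≠ [] → s.length ≤ fi + i + 1 → s.length ≤ fo + i + 2 →
        pvOuterA s window fo (pvCollectA s window fi i g).2
            (groups ++ [(pvCollectA s window fi i g).1])
          = pvRefB window ((s.zip (s.drop 1)).drop i) g groups)
      ∧ (∀ groups fo, s.length ≤ fo + i + 1 →
          pvOuterA s window fo i groups
            = pvRefB window ((s.zip (s.drop 1)).drop i) [] groups) := by
  intro k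
  induction k using Nat.strong_induction_on with
  | _ k ih =>
    intro i hk
    have inner : ∀ g groups fi fo, g ≠ [] → s.length ≤ fi + i + 1 → s.length ≤ fo + i + 2 →
        pvOuterA s window fo (pvCollectA s window fi i g).2
            (groups ++ [(pvCollectA s window fi i g).1])
          = pvRefB window ((s.zip (s.drop 1)).drop i) g groups := by
      intro g groups fi fo hg hfi hfo
      have hge : g.isEmpty = false := by simpa [List.isEmpty_iff] using hg
      by_cases h : i + 1 < s.length
      · rw [pvZip_drop_cons s i h]
        obtain ⟨fi', rfl⟩ : ∃ fi', fi = fi' + 1 := ⟨fi - 1, by omega⟩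
        by_cases hw : s[i + 1] - s[i]'(by omega) < window
        · -- absorb s[i+1], recurse at i+1
          have hcoll : pvCollectA s window (fi' + 1) i g
              = pvCollectA s window fi' (i + 1) (g ++ [s[i + 1]]) := by
            rw [pvCollectA]; simp only [dif_pos h, if_pos hw]
          rw [hcoll]
          have hrec := (ih (s.length - (i + 1)) (by omega) (i + 1) rfl).1
            (g ++ [s[i + 1]]) groups fi' fo (by simp) (by omega) (by omega)
          rw [hrec]
          simp [pvRefB, hge, hw]
        · -- group ends here
          have hcoll : pvCollectA s window (fi' + 1) i g = (g, i + 1) := by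
            rw [pvCollectA]; simp only [dif_pos h, if_neg hw]
          rw [hcoll]
          have hrec := (ih (s.length - (i + 1)) (by omega) (i + 1) rfl).2
            (groups ++ [g]) fo (by omega)
          simp only [pvRefB, if_neg hw, hge, Bool.false_eq_true]
          exact hrec
      · -- i+1 ≥ len: collect returns (g, i+1), outer stops, ref flushes g
        have hcoll : pvCollectA s window fi i g = (g, i + 1) := by
          cases fi with
          | zero => rfl
          | succ fi' => rw [pvCollectA]; simp only [dif_neg h]
        rw [hcoll, pvZip_drop_nil s i h]
        have houter : pvOuterA s window fo (i + 1) (groups ++ [g]) = groups ++ [g] := by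
          cases fo with
          | zero => rfl
          | succ fo' =>
              rw [pvOuterA]
              have h2 : ¬ i + 1 + 1 < s.length := by omega
              simp only [dif_neg h2]
        rw [houter]
        simp [pvRefB, hge]
    refine ⟨inner, ?_⟩
    intro groups fo hfo
    by_cases h : i + 1 < s.length
    · have hi : i < s.length := by omega
      obtain ⟨fo', rfl⟩ : ∃ fo', fo = fo' + 1 := ⟨fo - 1, by omega⟩
      rw [pvOuterA]
      simp only [dif_pos h]
      rw [inner [s[i]'hi] groups s.length fo' (by simp) (by omega) (by omega)]
      rw [pvZip_drop_cons s i h]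
      exact pvRefB_start window s[i] s[i + 1] _ groups
    · have houter : pvOuterA s window fo i groups = groups := by
        cases fo with
        | zero => rfl
        | succ fo' => rw [pvOuterA]; simp only [dif_neg h]
      rw [houter, pvZip_drop_nil s i h]
      simp [pvRefB]

-- ===== VERDICT (by name: the statement is the Claim_ definition above) =====
theorem group_sites_in_window2_spec : Claim_equal_group_sites_in_window2 := by
  intro sites window _
  unfold Spec_group_sites_in_window2 group_sites_in_window2 group_sites_in_window2_alt
  set s := PySem.List.sorted sites (fun x => x) false with hs
  have := (pvInnerOuter_eq_ref s window (s.length - 0) 0 rfl).2 [] s.length (by omega)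
  rw [this, pvRefB_eq_fold]
  simp
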